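-- pv_equiv track=rewrite | github.com/startFromBottom/programmers_problems_renewal | coding test practice/hash/베스트앨범.py | solution
-- ===== SOURCE A (Python) =====
-- from collections import defaultdict
-- from itertools import chain
--
-- def solution(genres, plays):
--
--     # step 1. Make criteria of Condition 1
--     genre_sum = defaultdict(int)
--     for g, p in zip(genres, plays):
--         genre_sum[g] += p
--
--     # step 2. Sort songs by Condition 1, 2, 3
--     indexs = range(len(genres))
--     infos = [(genre_sum[g], g, p, i) for i, g, p in zip(indexs, genres, plays)]
--     infos.sort(key=lambda x: (-x[0], -x[2], x[3]))
--
--     # step 3. Extract top 2 songs in each genres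
--     genre_top2 = defaultdict(list)
--     for info in infos:
--         g, idx = info[1], info[-1]
--         if len(genre_top2[g]) < 2:
--             genre_top2[g].append(info[-1])
--
--     return list(chain(*genre_top2.values()))
-- ===== SOURCE B (Python) =====
-- def solution(genres, plays):
--     n = min(len(genres), len(plays))
--     sums = {}
--     for k in range(n):
--         sums[genres[k]] = sums.get(genres[k], 0) + plays[k]
--     order = sorted(range(n), key=lambda i: (-sums[genres[i]], -plays[i], i))
--     seen = []
--     for i in order:
--         if genres[i] not in seen:
--             seen.append(genres[i])
--     answer = []
--     for g in seen:
--         picked = 0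
--         for i in order:
--             if picked < 2 and genres[i] == g:
--                 answer.append(i)
--                 picked += 1
--     return answer
-- ===== Notes on version B (the rewrite author's own statement) =====
-- stated objective: alternative
-- what changed: Replaces A's tuple-list build plus one-pass defaultdict top-2 accumulation with sorting a bare index list, collecting the genre order with an explicit first-occurrence list, and emitting each genre's top 2 by a counted per-genre scan of the sorted order (no dicts of lists, no chain).
import Mathlib
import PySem

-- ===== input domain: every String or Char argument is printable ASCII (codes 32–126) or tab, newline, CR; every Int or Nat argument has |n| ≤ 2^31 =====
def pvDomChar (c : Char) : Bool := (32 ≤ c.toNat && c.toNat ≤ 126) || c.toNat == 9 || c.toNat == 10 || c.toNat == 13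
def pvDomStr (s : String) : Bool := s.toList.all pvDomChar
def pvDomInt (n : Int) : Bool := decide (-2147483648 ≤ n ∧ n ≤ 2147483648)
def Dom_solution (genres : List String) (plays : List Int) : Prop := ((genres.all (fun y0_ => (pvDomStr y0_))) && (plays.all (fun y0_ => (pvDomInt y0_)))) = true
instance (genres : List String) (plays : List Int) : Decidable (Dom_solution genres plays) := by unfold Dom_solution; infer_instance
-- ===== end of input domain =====

-- B replaces A's tuple-list build + one-pass defaultdict top-2 accumulation by sorting a bare
-- index list, an explicit first-occurrence genre list, and counted per-genre scans (objective: alternative).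


-- Python's 3-tuple sort key: ported as a 3-element Int list under Lean's lexicographic
-- List order, which matches Python's tuple comparison exactly for same-typed int components.
def pvKey3 (a b c : Int) : List Int := [a, b, c]

-- sorted(xs, key=...) at a LinearOrder key type (here: List Int); thin wrapper fixing the
-- order instances to the LinearOrder ones
def pvSortBy {α κ : Type} [LinearOrder κ] (xs : List α) (key : α → κ) (rev : Bool) : List α :=
  PySem.List.sorted xs key rev

-- ===== PORT A =====
def solution (genres : List String) (plays : List Int) : List Int :=
  -- step 1: genre_sum (defaultdict(int); genre_sum[g] += p is modify g 0 (· + p))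
  let genreSum : PySem.Dict String Int :=
    (genres.zip plays).foldl (fun d gp => d.modify gp.1 0 (· + gp.2)) PySem.Dict.empty
  -- step 2: infos = [(genre_sum[g], g, p, i) ...]; zip of three truncates to the shortest
  let indexs := PySem.List.pyRange 0 (genres.length : Int) 1
  let infos : List (Int × String × Int × Int) :=
    (indexs.zip (genres.zip plays)).map (fun t => (genreSum.getD t.2.1 0, t.2.1, t.2.2, t.1))
  let sortedInfos := pvSortBy infos (fun x => pvKey3 (-x.1) (-x.2.2.1) x.2.2.2) false
  -- step 3: genre_top2 (defaultdict(list); the access genre_top2[g] plus conditional append is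
  -- exactly modify g [] (fun l => if l.length < 2 then l ++ [i] else l))
  let top2 : PySem.Dict String (List Int) :=
    sortedInfos.foldl (fun d info =>
      d.modify info.2.1 [] (fun l => if l.length < 2 then l ++ [info.2.2.2] else l))
      PySem.Dict.empty
  top2.values.flatten

-- ===== PORT B =====
-- every index produced by range(n) is in range, so pyGetD's default is never used
def solution_alt (genres : List String) (plays : List Int) : List Int :=
  let n : Int := min (genres.length : Int) (plays.length : Int)
  let sums : PySem.Dict String Int :=
    (PySem.List.pyRange 0 n 1).foldl (fun d k =>
      d.insert (PySem.List.pyGetD genres k "")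
        (d.getD (PySem.List.pyGetD genres k "") 0 + PySem.List.pyGetD plays k 0))
      PySem.Dict.empty
  let order := pvSortBy (PySem.List.pyRange 0 n 1)
      (fun i => pvKey3 (-(sums.getD (PySem.List.pyGetD genres i "") 0))
                       (-(PySem.List.pyGetD plays i 0)) i) false
  let seen : List String := order.foldl (fun acc i =>
      if PySem.List.pyGetD genres i "" ∈ acc then acc
      else acc ++ [PySem.List.pyGetD genres i ""]) []
  seen.foldl (fun acc g =>
    (order.foldl (fun st i =>
        if st.2 < 2 ∧ PySem.List.pyGetD genres i "" = g then (st.1 ++ [i], st.2 + 1) else st)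
      (acc, (0 : Int))).1) []

-- ===== PRECONDITION & SPEC =====
def Spec_solution (genres : List String) (plays : List Int) (out : List Int) : Prop := out = solution_alt genres plays
instance (genres : List String) (plays : List Int) (out : List Int) : Decidable (Spec_solution genres plays out) := by unfold Spec_solution; infer_instance

-- ===== CLAIM (what is proved, stated in full; the proofs are below) =====
def Claim_equal_solution : Prop := ∀ (genres : List String) (plays : List Int), Dom_solution genres plays → Spec_solution genres plays (solution genres plays)

-- ===== LEMMAS AND PROOFS =====

-- shared normal form both ports are reduced to
def pvSums (genres : List String) (plays : List Int) : PySem.Dict String Int :=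
  (PySem.List.pyRange 0 ((min genres.length plays.length : Nat) : Int) 1).foldl
    (fun d k => d.insert (PySem.List.pyGetD genres k "")
      (d.getD (PySem.List.pyGetD genres k "") 0 + PySem.List.pyGetD plays k 0))
    PySem.Dict.empty

def pvOrd (genres : List String) (plays : List Int) : List Int :=
  pvSortBy (PySem.List.pyRange 0 ((min genres.length plays.length : Nat) : Int) 1)
    (fun i => pvKey3 (-((pvSums genres plays).getD (PySem.List.pyGetD genres i "") 0))
                     (-(PySem.List.pyGetD plays i 0)) i) false

def pvN (genres : List String) (plays : List Int) : List Int :=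
  (PySem.Set.ofList ((pvOrd genres plays).map (fun j => PySem.List.pyGetD genres j ""))).flatMap
    (fun g => ((pvOrd genres plays).filter (fun j => PySem.List.pyGetD genres j "" == g)).take 2)

-- getD after a sum-accumulating modify fold (A's genre_sum loop), indexed form
theorem pv_modify_add_idx (gf : Int → String) (pf : Int → Int) (l : List Int)
    (d : PySem.Dict String Int) (g : String) :
    (l.foldl (fun d j => d.modify (gf j) 0 (· + pf j)) d).getD g 0
      = d.getD g 0 + ((l.filter (fun j => gf j == g)).map pf).sum := by
  induction l generalizing d with
  | nil => simp
  | cons j t ih =>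
    simp only [List.foldl_cons, ih, List.filter_cons]
    by_cases h : gf j = g
    · simp [h]; ring
    · simp [h, PySem.Dict.getD_modify, Ne.symm h]

-- getD after a sum-accumulating insert fold (B's sums loop), indexed form
theorem pv_insert_add_idx (gf : Int → String) (pf : Int → Int) (l : List Int)
    (d : PySem.Dict String Int) (g : String) :
    (l.foldl (fun d j => d.insert (gf j) (d.getD (gf j) 0 + pf j)) d).getD g 0
      = d.getD g 0 + ((l.filter (fun j => gf j == g)).map pf).sum := by
  induction l generalizing d with
  | nil => simp
  | cons j t ih =>
    simp only [List.foldl_cons, ih, List.filter_cons]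
    by_cases h : gf j = g
    · simp [h]; ring
    · simp [h, PySem.Dict.getD_insert, Ne.symm h]

-- the conditional-append top-2 fold (A's step 3), characterised per key
theorem pv_getD_top2_fold (kf : Int → String) (l : List Int) (d : PySem.Dict String (List Int)) (g : String) :
    (l.foldl (fun d j => d.modify (kf j) [] (fun v => if v.length < 2 then v ++ [j] else v)) d).getD g []
      = (d.getD g []) ++ (l.filter (fun j => kf j == g)).take (2 - (d.getD g []).length) := by
  induction l generalizing d with
  | nil => simp
  | cons j t ih =>
    simp only [List.foldl_cons, ih, List.filter_cons]
    by_cases h : kf j = g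
    · simp only [h, PySem.Dict.getD_modify]
      by_cases h2 : (d.getD g []).length < 2
      · have : 2 - (d.getD g []).length = (2 - (d.getD g [] ++ [j]).length) + 1 := by
          simp; omega
        simp [h2, this, List.append_assoc]
      · have : 2 - (d.getD g []).length = 0 := by omega
        simp [h2, this]
    · have hne : g ≠ kf j := Ne.symm h
      simp [PySem.Dict.getD_modify, hne, h]

-- values of a dict with Nodup keys, read back through getD
theorem pv_values_eq_map_getD {ν : Type} (d : PySem.Dict String ν) (dflt : ν) (h : d.keys.Nodup) :
    d.values = d.keys.map (fun k => d.getD k dflt) := by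
  obtain ⟨items⟩ := d
  induction items with
  | nil => rfl
  | cons p t ih =>
    obtain ⟨k, v⟩ := p
    simp only [PySem.Dict.keys, PySem.Dict.values, List.map_cons] at h ih ⊢
    have hk : k ∉ t.map (·.1) := (List.nodup_cons.mp h).1
    have ht := ih (List.nodup_cons.mp h).2
    congr 1
    · simp [PySem.Dict.getD_eq_get?_getD, PySem.Dict.get?_mk_cons]
    · rw [ht, List.map_map, List.map_map]
      apply List.map_congr_left
      intro a ha
      have hne : k ≠ a.1 := fun e => hk (e ▸ List.mem_map_of_mem ha)
      simp [Function.comp, PySem.Dict.getD_eq_get?_getD, PySem.Dict.get?_mk_cons, hne]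

-- B's counted per-genre scan = take 2 of the filter
theorem pv_picked_fold (p : Int → Prop) [DecidablePred p] (l : List Int) (acc : List Int) (c : Int) :
    (l.foldl (fun st i => if st.2 < 2 ∧ p i then (st.1 ++ [i], st.2 + 1) else st) (acc, c)).1
      = acc ++ (l.filter (fun i => decide (p i))).take (2 - c).toNat := by
  induction l generalizing acc c with
  | nil => simp
  | cons j t ih =>
    simp only [List.foldl_cons, List.filter_cons]
    by_cases hp : p j
    · by_cases hc : c < 2
      · rw [if_pos ⟨hc, hp⟩, ih]
        have e : (2 - c).toNat = (2 - (c + 1)).toNat + 1 := by omega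
        simp [hp, e]
      · rw [if_neg (by tauto), ih]
        have e : (2 - c).toNat = 0 := by omega
        simp [hp, e]
    · rw [if_neg (by tauto), ih]
      simp [hp]

-- the index list both programs traverse
theorem pv_zip_eq_map_range (genres : List String) (plays : List Int) :
    genres.zip plays
      = (PySem.List.pyRange 0 ((min genres.length plays.length : Nat) : Int) 1).map
          (fun k => (PySem.List.pyGetD genres k "", PySem.List.pyGetD plays k 0)) := by
  rw [PySem.List.pyRange_zero_natCast, List.map_map]
  apply List.ext_getElem
  · simp [List.length_zip]
  · intro i h1 h2
    have hg : i < genres.length := by simp [List.length_zip] at h1; omega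
    have hp : i < plays.length := by simp [List.length_zip] at h1; omega
    rw [List.getElem_map, List.getElem_zip, List.getElem_range]
    simp only [Function.comp]
    rw [PySem.List.pyGetD_of_nonneg genres "" (Int.natCast_nonneg i),
        PySem.List.pyGetD_of_nonneg plays 0 (Int.natCast_nonneg i)]
    simp [hg, hp]

theorem pv_string_filter_eq (kf : Int → String) (g : String) (l : List Int) :
    l.filter (fun j => kf j == g) = l.filter (fun j => decide (kf j = g)) := by
  apply List.filter_congr
  intro x _
  by_cases h : kf x = g <;> simp [h]

-- pvSortBy citations of the PySem sorted lemmas (fixing the LinearOrder instances)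
theorem pvSortBy_perm {α κ : Type} [LinearOrder κ] (xs : List α) (key : α → κ) (rev : Bool) :
    (pvSortBy xs key rev).Perm xs := PySem.List.sorted_perm xs key rev

theorem pvSortBy_pairwise {α κ : Type} [LinearOrder κ] (xs : List α) (key : α → κ) :
    (pvSortBy xs key false).Pairwise (fun a b => key a ≤ key b) :=
  PySem.List.sorted_pairwise xs key

theorem pvSortBy_eq_of_perm_of_pairwise_lt {α κ : Type} [LinearOrder κ] (xs ys : List α)
    (key : α → κ) (hp : ys.Perm xs) (hw : ys.Pairwise (fun a b => key a < key b)) :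
    pvSortBy xs key false = ys :=
  PySem.List.sorted_eq_of_perm_of_pairwise_lt xs ys key hp hw

theorem pv_key3_inj {a b c a' b' c' : Int} (h : pvKey3 a b c = pvKey3 a' b' c') : c = c' := by
  simp [pvKey3] at h
  exact h.2.2

theorem pv_idxzip (genres : List String) (plays : List Int) :
    (PySem.List.pyRange 0 (genres.length : Int) 1).zip (genres.zip plays)
      = (PySem.List.pyRange 0 ((min genres.length plays.length : Nat) : Int) 1).map
          (fun j => (j, PySem.List.pyGetD genres j "", PySem.List.pyGetD plays j 0)) := by
  rw [PySem.List.pyRange_zero_natCast, PySem.List.pyRange_zero_natCast, List.map_map]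
  apply List.ext_getElem
  · simp [List.length_zip]
  · intro i h1 h2
    have hg : i < genres.length := by simp [List.length_zip] at h1; omega
    have hp : i < plays.length := by simp [List.length_zip] at h1; omega
    rw [List.getElem_zip, List.getElem_map, List.getElem_map, List.getElem_zip,
        List.getElem_range, List.getElem_range]
    simp only [Function.comp]
    rw [PySem.List.pyGetD_of_nonneg genres "" (Int.natCast_nonneg i),
        PySem.List.pyGetD_of_nonneg plays 0 (Int.natCast_nonneg i)]
    simp [hg, hp]

theorem pv_nodup_range (genres : List String) (plays : List Int) :
    (PySem.List.pyRange 0 ((min genres.length plays.length : Nat) : Int) 1).Nodup := by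
  rw [PySem.List.pyRange_zero_natCast]
  exact List.nodup_range.map (fun a b h => by exact_mod_cast h)

theorem pv_ord_pairwise (genres : List String) (plays : List Int) :
    (pvOrd genres plays).Pairwise (fun a b =>
      (fun i => pvKey3 (-((pvSums genres plays).getD (PySem.List.pyGetD genres i "") 0))
                       (-(PySem.List.pyGetD plays i 0)) i) a
      < (fun i => pvKey3 (-((pvSums genres plays).getD (PySem.List.pyGetD genres i "") 0))
                       (-(PySem.List.pyGetD plays i 0)) i) b) := by
  have hle := pvSortBy_pairwise (PySem.List.pyRange 0 ((min genres.length plays.length : Nat) : Int) 1)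
      (fun i => pvKey3 (-((pvSums genres plays).getD (PySem.List.pyGetD genres i "") 0))
                       (-(PySem.List.pyGetD plays i 0)) i)
  have hnd : (pvOrd genres plays).Nodup :=
    ((pvSortBy_perm _ _ _).nodup_iff).mpr (pv_nodup_range genres plays)
  have hne : (pvOrd genres plays).Pairwise (· ≠ ·) := hnd
  exact (hle.and hne).imp (fun h => lt_of_le_of_ne h.1 (fun e => h.2 (pv_key3_inj e)))

theorem pv_B_norm (genres : List String) (plays : List Int) :
    solution_alt genres plays = pvN genres plays := by
  simp only [solution_alt]
  have hn : min ((genres.length : Int)) ((plays.length : Int))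
      = ((min genres.length plays.length : Nat) : Int) := by push_cast; rfl
  rw [hn]
  rw [show (PySem.List.pyRange 0 ((min genres.length plays.length : Nat) : Int) 1).foldl
      (fun d k => d.insert (PySem.List.pyGetD genres k "")
        (d.getD (PySem.List.pyGetD genres k "") 0 + PySem.List.pyGetD plays k 0))
      PySem.Dict.empty = pvSums genres plays from rfl]
  rw [show pvSortBy (PySem.List.pyRange 0 ((min genres.length plays.length : Nat) : Int) 1)
      (fun i => pvKey3 (-((pvSums genres plays).getD (PySem.List.pyGetD genres i "") 0))
                       (-(PySem.List.pyGetD plays i 0)) i) false = pvOrd genres plays from rfl]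
  have hseen : (pvOrd genres plays).foldl
      (fun acc i => if PySem.List.pyGetD genres i "" ∈ acc then acc
        else acc ++ [PySem.List.pyGetD genres i ""]) []
      = PySem.Set.ofList ((pvOrd genres plays).map (fun j => PySem.List.pyGetD genres j "")) := by
    rw [← PySem.Set.update_nil_left, PySem.Set.update_map_eq_foldl_add]
    apply PySem.List.foldl_congr_mem
    intro acc x _
    rw [PySem.Set.add_eq_ite]
  rw [hseen]
  have hstep : ∀ (acc : List Int) (g : String),
      ((pvOrd genres plays).foldl (fun st i =>
          if st.2 < 2 ∧ PySem.List.pyGetD genres i "" = g then (st.1 ++ [i], st.2 + 1) else st)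
        (acc, (0 : Int))).1
      = acc ++ ((pvOrd genres plays).filter (fun j => PySem.List.pyGetD genres j "" == g)).take 2 := by
    intro acc g
    rw [pv_picked_fold (p := fun i => PySem.List.pyGetD genres i "" = g), ← pv_string_filter_eq]
    simp
  have hc := PySem.List.foldl_congr_mem
      (l := PySem.Set.ofList ((pvOrd genres plays).map (fun j => PySem.List.pyGetD genres j "")))
      (init := ([] : List Int))
      (f := fun acc g => ((pvOrd genres plays).foldl (fun st i =>
          if st.2 < 2 ∧ PySem.List.pyGetD genres i "" = g then (st.1 ++ [i], st.2 + 1) else st)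
        (acc, (0 : Int))).1)
      (g := fun acc g =>
        acc ++ ((pvOrd genres plays).filter (fun j => PySem.List.pyGetD genres j "" == g)).take 2)
      (fun acc x _ => hstep acc x)
  rw [hc, PySem.List.foldl_append_eq_flatMap]
  simp [pvN]

theorem pv_A_norm (genres : List String) (plays : List Int) :
    solution genres plays = pvN genres plays := by
  simp only [solution]
  set GS := (genres.zip plays).foldl (fun d gp => d.modify gp.1 0 (· + gp.2)) PySem.Dict.empty with hGS
  have hsum : ∀ g : String, GS.getD g 0 = (pvSums genres plays).getD g 0 := by
    intro g
    rw [hGS, pv_zip_eq_map_range]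
    simp only [List.foldl_map]
    rw [pv_modify_add_idx (gf := fun j => PySem.List.pyGetD genres j "")
        (pf := fun j => PySem.List.pyGetD plays j 0)]
    rw [pvSums, pv_insert_add_idx (gf := fun j => PySem.List.pyGetD genres j "")
        (pf := fun j => PySem.List.pyGetD plays j 0)]
  rw [pv_idxzip, List.map_map]
  have hm : ((PySem.List.pyRange 0 ((min genres.length plays.length : Nat) : Int) 1).map
        ((fun t : Int × String × Int => (GS.getD t.2.1 0, t.2.1, t.2.2, t.1))
          ∘ (fun j => (j, PySem.List.pyGetD genres j "", PySem.List.pyGetD plays j 0))))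
      = (PySem.List.pyRange 0 ((min genres.length plays.length : Nat) : Int) 1).map
          (fun j => ((pvSums genres plays).getD (PySem.List.pyGetD genres j "") 0,
            PySem.List.pyGetD genres j "", PySem.List.pyGetD plays j 0, j)) :=
    List.map_congr_left (fun j _ => by simp only [Function.comp]; rw [hsum])
  rw [hm]
  have hsorted : pvSortBy
      ((PySem.List.pyRange 0 ((min genres.length plays.length : Nat) : Int) 1).map
        (fun j => ((pvSums genres plays).getD (PySem.List.pyGetD genres j "") 0,
          PySem.List.pyGetD genres j "", PySem.List.pyGetD plays j 0, j)))
      (fun x => pvKey3 (-x.1) (-x.2.2.1) x.2.2.2) false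
      = (pvOrd genres plays).map
          (fun j => ((pvSums genres plays).getD (PySem.List.pyGetD genres j "") 0,
            PySem.List.pyGetD genres j "", PySem.List.pyGetD plays j 0, j)) := by
    apply pvSortBy_eq_of_perm_of_pairwise_lt
    · exact (pvSortBy_perm _ _ _).map _
    · exact List.pairwise_map.mpr (pv_ord_pairwise genres plays)
  rw [hsorted]
  simp only [List.foldl_map]
  rw [pv_values_eq_map_getD _ ([] : List Int)
      (PySem.Dict.nodup_keys_foldl_modify_key _ _ _ _ _ (by exact List.nodup_nil))]
  rw [PySem.Dict.keys_foldl_modify_key]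
  have hkeys : (PySem.Dict.empty : PySem.Dict String (List Int)).keys = [] := rfl
  rw [hkeys, PySem.Set.update_nil_left]
  have hget : ∀ g : String,
      (((pvOrd genres plays).foldl (fun d j =>
          d.modify (PySem.List.pyGetD genres j "") []
            (fun l => if l.length < 2 then l ++ [j] else l)) PySem.Dict.empty).getD g [])
      = ((pvOrd genres plays).filter (fun j => PySem.List.pyGetD genres j "" == g)).take 2 := by
    intro g
    rw [pv_getD_top2_fold]
    simp
  rw [List.map_congr_left (fun g _ => hget g), pvN, List.flatMap_def]

-- ===== VERDICT (by name: the statement is the Claim_ definition above) =====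
theorem solution_spec : Claim_equal_solution := by
  intro genres plays _
  exact (pv_A_norm genres plays).trans (pv_B_norm genres plays).symm
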